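-- pv_equiv track=rewrite | github.com/Lakshya-Lalotra/codejam | 2020/round_1a/pattern_matching.py | solve
-- ===== SOURCE A (Python) =====
-- from typing import List
--
-- class ImpossibleError(BaseException):
--     pass
--
-- def split_pattern(pattern: str) -> List[str]:
--     sub_patterns = pattern.split("*")
--     first = sub_patterns[0]
--     last = sub_patterns[-1]
--     mid = "".join(sub_patterns[1:-1])
--     return [first, mid, last]
--
-- def find_string(target_patterns: List[str]) -> str:
--     # ignore empty pattern because it matches with any string
--     target_patterns = [p for p in target_patterns if p != ""]
--
--     if len(target_patterns) == 0:
--         return ""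
--
--     longest_pattern = max(target_patterns, key=len)
--     for pattern in target_patterns:
--         if longest_pattern[:len(pattern)] != pattern:
--             raise ImpossibleError()
--
--     return longest_pattern
--
-- def solve(n: int, patterns: List[str]):
--     # count max number of stars
--     max_stars = 0
--     for pattern in patterns:
--         max_stars = max(max_stars, pattern.count("*"))
--
--     # split patterns
--     first_patterns = list()
--     mid_patterns = list()
--     last_patterns = list()
--     for pattern in patterns:
--         f, m, l = split_pattern(pattern)
--         first_patterns.append(f)
--         mid_patterns.append(m)
--         last_patterns.append(l)
--
--     # process "XXXX*" patterns
--     first_string = find_string(first_patterns)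
--
--     # process "*XXXXX*" patterns
--     mid_string = "".join(mid_patterns)
--
--     # process "*XXXXX" patterns
--     last_string = find_string(
--         [p[::-1] for p in last_patterns]
--     )[::-1]
--
--     return "".join([first_string, mid_string, last_string])
-- ===== SOURCE B (Python) =====
-- class ImpossibleError(BaseException):
--     pass
--
--
-- def _fold_prefix(parts):
--     # running result: the longest pattern seen so far; every part must be
--     # prefix-compatible with it, else the instance is impossible
--     result = ""
--     for p in parts:
--         if p.startswith(result):
--             result = p
--         elif not result.startswith(p):
--             raise ImpossibleError()
--     return result
--
--
-- def _fold_suffix(parts):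
--     result = ""
--     for p in parts:
--         if p.endswith(result):
--             result = p
--         elif not result.endswith(p):
--             raise ImpossibleError()
--     return result
--
--
-- def solve(n, patterns):
--     split = [p.split("*") for p in patterns]
--     first = _fold_prefix([s[0] for s in split])
--     mid = "".join(c for s in split for c in s[1:-1])
--     last = _fold_suffix([s[-1] for s in split])
--     return first + mid + last
-- ===== Notes on version B (the rewrite author's own statement) =====
-- stated objective: simpler
-- what changed: Replaces each max-by-length-then-verify-all-prefixes pass (and the reverse trick for suffixes) by a single running fold that keeps whichever of (running, part) the other is a prefix/suffix of, drops the unused max_stars loop, and splits patterns inline with comprehensions instead of a three-list builder loop.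
import Mathlib
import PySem

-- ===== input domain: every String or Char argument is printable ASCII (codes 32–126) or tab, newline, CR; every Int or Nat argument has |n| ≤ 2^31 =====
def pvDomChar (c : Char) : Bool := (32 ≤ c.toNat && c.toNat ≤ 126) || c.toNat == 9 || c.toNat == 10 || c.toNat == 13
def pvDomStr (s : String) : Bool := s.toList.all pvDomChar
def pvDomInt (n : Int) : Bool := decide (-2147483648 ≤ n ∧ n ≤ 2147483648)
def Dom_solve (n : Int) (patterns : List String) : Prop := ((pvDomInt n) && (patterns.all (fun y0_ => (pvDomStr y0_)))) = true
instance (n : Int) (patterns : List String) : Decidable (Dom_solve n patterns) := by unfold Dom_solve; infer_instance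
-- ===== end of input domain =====

-- B replaces A's max-by-length-then-verify-all-prefixes passes (and the reverse trick for
-- suffixes) by one running prefix/suffix fold, and drops the unused max_stars loop: simpler.
-- Where the Python raises ImpossibleError both versions raise; those inputs are outside Pre_solve
-- and the ports return "" there (Option `none` collapsed at the end).

-- ===== PORT A =====

-- p[::-1]  (step -1 slice never raises)
def pyRev (s : String) : String := (PySem.Str.slice? s none none (-1)).getD ""

-- split_pattern: returns the triple (first, mid, last); the Python list [first, mid, last] is
-- immediately unpacked as f, m, l by the only caller.
def splitPattern (pattern : String) : String × String × String :=
  let subPatterns := (PySem.Str.split? pattern "*").getD []  -- sep "*" ≠ "": split? is never none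
  let first := (PySem.List.pyGet? subPatterns 0).getD ""     -- split never returns []: no IndexError
  let last := (PySem.List.pyGet? subPatterns (-1)).getD ""
  let mid := PySem.Str.join "" (PySem.List.slice subPatterns (some 1) (some (-1)))
  (first, mid, last)

-- find_string; `none` = raise ImpossibleError (the for-loop raises iff some pattern fails the
-- prefix test, i.e. iff the `all` below is false)
def findString (targetPatterns : List String) : Option String :=
  let tps := targetPatterns.filter (fun p => p != "")
  if (tps.length : Int) = 0 then some ""
  else
    match PySem.List.max? tps (fun p => PySem.Str.len p) with
    | none => some ""   -- unreachable: tps ≠ []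
    | some longest =>
      if tps.all (fun pattern => PySem.Str.slice longest none (some (PySem.Str.len pattern)) == pattern)
      then some longest
      else none

def solve (n : Int) (patterns : List String) : String :=
  let _maxStars : Int := patterns.foldl (fun m pattern => max m (PySem.Str.count pattern "*" : Int)) 0
  let lists := patterns.foldl
    (fun (acc : List String × List String × List String) pattern =>
      (acc.1 ++ [(splitPattern pattern).1], acc.2.1 ++ [(splitPattern pattern).2.1],
       acc.2.2 ++ [(splitPattern pattern).2.2]))
    ([], [], [])
  let firstString? := findString lists.1
  let midString := PySem.Str.join "" lists.2.1
  let lastString? := (findString (lists.2.2.map (fun p => pyRev p))).map (fun s => pyRev s)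
  match firstString?, lastString? with
  | some firstString, some lastString => PySem.Str.join "" [firstString, midString, lastString]
  | _, _ => ""   -- unreachable under Pre_solve: the Python raises ImpossibleError here

-- ===== PORT B =====

-- _fold_prefix; `none` = raise ImpossibleError
def foldPrefix (parts : List String) : Option String :=
  parts.foldl (fun acc p => acc.bind (fun result =>
    if PySem.Str.startswith p result then some p
    else if PySem.Str.startswith result p then some result
    else none)) (some "")

-- _fold_suffix; `none` = raise ImpossibleError
def foldSuffix (parts : List String) : Option String :=
  parts.foldl (fun acc p => acc.bind (fun result =>
    if PySem.Str.endswith p result then some p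
    else if PySem.Str.endswith result p then some result
    else none)) (some "")

def solve_alt (n : Int) (patterns : List String) : String :=
  let split := patterns.map (fun p => (PySem.Str.split? p "*").getD [])  -- sep ≠ "": never none
  let first? := foldPrefix (split.map (fun s => (PySem.List.pyGet? s 0).getD ""))
  let mid := PySem.Str.join "" (split.flatMap (fun s => PySem.List.slice s (some 1) (some (-1))))
  let last? := foldSuffix (split.map (fun s => (PySem.List.pyGet? s (-1)).getD ""))
  match first? with
  | none => ""   -- unreachable under Pre_solve: the Python raises ImpossibleError here
  | some first =>
    match last? with
    | none => ""   -- unreachable under Pre_solve: the Python raises ImpossibleError here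
    | some last => PySem.Str.join "" [first, mid, last]  -- first + mid + last

-- ===== PRECONDITION & SPEC =====

-- the segment of p before its first '*' (= whole p if no '*'), and after its last '*'
def pvFirstPart (p : String) : String :=
  (PySem.List.pyGet? ((PySem.Str.split? p "*").getD []) 0).getD ""
def pvLastPart (p : String) : String :=
  (PySem.List.pyGet? ((PySem.Str.split? p "*").getD []) (-1)).getD ""

-- Pre_solve excludes exactly the inputs on which the Python A raises ImpossibleError (B raises
-- there too): the pre-'*' segments must form a prefix chain and the post-'*' segments a suffix
-- chain, i.e. any two must be prefix-/suffix-comparable.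
def Pre_solve (n : Int) (patterns : List String) : Prop :=
  (∀ p ∈ patterns, ∀ q ∈ patterns,
      (pvFirstPart p).toList <+: (pvFirstPart q).toList ∨
      (pvFirstPart q).toList <+: (pvFirstPart p).toList) ∧
  (∀ p ∈ patterns, ∀ q ∈ patterns,
      (pvLastPart p).toList <:+ (pvLastPart q).toList ∨
      (pvLastPart q).toList <:+ (pvLastPart p).toList)
instance (n : Int) (patterns : List String) : Decidable (Pre_solve n patterns) := by
  unfold Pre_solve; infer_instance

def pvWitness_solve : Int × List String := (3, ["ab*", "*b", "a*ab"])

def Spec_solve (n : Int) (patterns : List String) (out : String) : Prop := out = solve_alt n patterns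
instance (n : Int) (patterns : List String) (out : String) : Decidable (Spec_solve n patterns out) := by
  unfold Spec_solve; infer_instance

-- ===== CLAIM (what is proved, stated in full; the proofs are below) =====
def Claim_equal_solve : Prop := ∀ (n : Int) (patterns : List String), Dom_solve n patterns → Pre_solve n patterns → Spec_solve n patterns (solve n patterns)

-- ===== LEMMAS AND PROOFS =====

-- both A's find_string and B's fold return the unique string every part is a prefix of
def GoodP (l : List String) (m : String) : Prop :=
  (∀ p ∈ l, p.toList <+: m.toList) ∧ (m ∈ l ∨ m = "")

lemma prefix_empty_eq {s : String} (h : s.toList <+: ([] : List Char)) : s = "" := by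
  have h0 := List.prefix_nil.mp h
  exact String.toList_inj.mp (by simp [h0])

lemma goodP_unique {l : List String} {m₁ m₂ : String}
    (h₁ : GoodP l m₁) (h₂ : GoodP l m₂) : m₁ = m₂ := by
  obtain ⟨a₁, b₁⟩ := h₁
  obtain ⟨a₂, b₂⟩ := h₂
  rcases b₁ with h | h
  · rcases b₂ with h' | h'
    · have p12 := a₂ m₁ h
      have p21 := a₁ m₂ h'
      exact String.toList_inj.mp
        (List.IsPrefix.eq_of_length p12 (le_antisymm p12.length_le p21.length_le))
    · subst h'
      exact prefix_empty_eq (by simpa using a₂ m₁ h)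
  · subst h
    rcases b₂ with h' | h'
    · exact (prefix_empty_eq (by simpa using a₁ m₂ h')).symm
    · rw [h']

lemma findString_good (l : List String)
    (hc : ∀ p ∈ l, ∀ q ∈ l, p.toList <+: q.toList ∨ q.toList <+: p.toList) :
    ∃ m, findString l = some m ∧ GoodP l m := by
  by_cases hnil : l.filter (fun p => p != "") = []
  · refine ⟨"", by simp [findString, hnil], ?_, Or.inr rfl⟩
    intro p hp
    have hpe : p = "" := by simpa using List.filter_eq_nil_iff.mp hnil p hp
    simp [hpe]
  · have hlen : ¬ ((l.filter (fun p => p != "")).length : Int) = 0 := by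
      intro h
      exact hnil (List.length_eq_zero_iff.mp (by exact_mod_cast h))
    rcases hmax : PySem.List.max? (l.filter (fun p => p != "")) (fun p => PySem.Str.len p)
      with _ | longest
    · exact absurd ((PySem.List.max?_eq_none_iff _ _).mp hmax) hnil
    · have hmem := PySem.List.max?_mem hmax
      have hisMax := PySem.List.max?_isMax hmax
      have hlong : ∀ p ∈ l, p.toList <+: longest.toList := by
        intro p hp
        by_cases hpe : p = ""
        · simp [hpe]
        · have hpf : p ∈ l.filter (fun p => p != "") := by
            simp [List.mem_filter, hp, hpe]
          have hle : p.toList.length ≤ longest.toList.length := by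
            have := hisMax p hpf
            simp only [PySem.Str.len_eq] at this
            exact_mod_cast this
          rcases hc p hp longest (List.mem_of_mem_filter hmem) with h | h
          · exact h
          · rw [List.IsPrefix.eq_of_length h (le_antisymm h.length_le hle)]
      have hall : (l.filter (fun p => p != "")).all
          (fun pattern =>
            PySem.Str.slice longest none (some (PySem.Str.len pattern)) == pattern) = true := by
        rw [List.all_eq_true]
        intro p hp
        have hpre := hlong p (List.mem_of_mem_filter hp)
        have ht : (PySem.Str.slice longest none (some (PySem.Str.len p))).toList = p.toList := by
          rw [PySem.Str.toList_slice, PySem.Chars.slice_eq_listSlice, PySem.Str.len_eq,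
            PySem.List.slice_to _ (Int.natCast_nonneg _), Int.toNat_natCast]
          exact (List.prefix_iff_eq_take.mp hpre).symm
        rw [beq_iff_eq]
        exact String.toList_inj.mp ht
      refine ⟨longest, ?_, hlong, Or.inl (List.mem_of_mem_filter hmem)⟩
      show (if ((l.filter (fun p => p != "")).length : Int) = 0 then some "" else
        match PySem.List.max? (l.filter (fun p => p != "")) (fun p => PySem.Str.len p) with
        | none => some ""
        | some longest =>
          if (l.filter (fun p => p != "")).all (fun pattern =>
              PySem.Str.slice longest none (some (PySem.Str.len pattern)) == pattern)
          then some longest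
          else none) = some longest
      rw [if_neg hlen, hmax]
      exact if_pos hall

lemma foldPrefix_go (l : List String) (r : String)
    (hc : ∀ p ∈ l, ∀ q ∈ l, p.toList <+: q.toList ∨ q.toList <+: p.toList)
    (hr : ∀ p ∈ l, r.toList <+: p.toList ∨ p.toList <+: r.toList) :
    ∃ m, l.foldl (fun acc p => acc.bind (fun result =>
        if PySem.Str.startswith p result then some p
        else if PySem.Str.startswith result p then some result
        else none)) (some r)
      = some m ∧ (∀ p ∈ l, p.toList <+: m.toList) ∧ r.toList <+: m.toList ∧ (m ∈ l ∨ m = r) := by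
  induction l generalizing r with
  | nil => exact ⟨r, rfl, by simp, List.prefix_rfl, Or.inr rfl⟩
  | cons p t ih =>
    have hct : ∀ a ∈ t, ∀ b ∈ t, a.toList <+: b.toList ∨ b.toList <+: a.toList :=
      fun a ha b hb => hc a (by simp [ha]) b (by simp [hb])
    by_cases hb : PySem.Str.startswith p r = true
    · have hpt : ∀ q ∈ t, p.toList <+: q.toList ∨ q.toList <+: p.toList :=
        fun q hq => hc p (by simp) q (by simp [hq])
      obtain ⟨m, hm, h1, h2, h3⟩ := ih p hct hpt
      have hrp : r.toList <+: p.toList :=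
        (PySem.Chars.startswith_iff p.toList r.toList).mp
          (by rwa [PySem.Str.startswith_eq] at hb)
      refine ⟨m, ?_, ?_, hrp.trans h2, ?_⟩
      · rw [List.foldl_cons]
        have hstep : (some r).bind (fun result =>
            if PySem.Str.startswith p result then some p
            else if PySem.Str.startswith result p then some result
            else none) = some p := by
          show (if PySem.Str.startswith p r then some p
            else if PySem.Str.startswith r p then some r
            else none) = some p
          rw [if_pos hb]
        rw [hstep]
        exact hm
      · intro q hq
        rcases List.mem_cons.mp hq with rfl | hq'
        · exact h2
        · exact h1 q hq'
      · rcases h3 with h | h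
        · exact Or.inl (List.mem_cons_of_mem _ h)
        · exact Or.inl (h ▸ List.mem_cons_self)
    · have hpr : p.toList <+: r.toList := by
        rcases hr p List.mem_cons_self with h | h
        · exact absurd (by
            rw [PySem.Str.startswith_eq]
            exact (PySem.Chars.startswith_iff p.toList r.toList).mpr h) hb
        · exact h
      have hb2 : PySem.Str.startswith r p = true := by
        rw [PySem.Str.startswith_eq]
        exact (PySem.Chars.startswith_iff r.toList p.toList).mpr hpr
      have hrt : ∀ q ∈ t, r.toList <+: q.toList ∨ q.toList <+: r.toList :=
        fun q hq => hr q (by simp [hq])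
      obtain ⟨m, hm, h1, h2, h3⟩ := ih r hct hrt
      refine ⟨m, ?_, ?_, h2, ?_⟩
      · rw [List.foldl_cons]
        have hstep : (some r).bind (fun result =>
            if PySem.Str.startswith p result then some p
            else if PySem.Str.startswith result p then some result
            else none) = some r := by
          show (if PySem.Str.startswith p r then some p
            else if PySem.Str.startswith r p then some r
            else none) = some r
          rw [if_neg hb, if_pos hb2]
        rw [hstep]
        exact hm
      · intro q hq
        rcases List.mem_cons.mp hq with rfl | hq'
        · exact hpr.trans h2
        · exact h1 q hq'
      · rcases h3 with h | h
        · exact Or.inl (List.mem_cons_of_mem _ h)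
        · exact Or.inr h

lemma foldPrefix_good (l : List String)
    (hc : ∀ p ∈ l, ∀ q ∈ l, p.toList <+: q.toList ∨ q.toList <+: p.toList) :
    ∃ m, foldPrefix l = some m ∧ GoodP l m := by
  obtain ⟨m, hm, h1, _, h3⟩ := foldPrefix_go l "" hc (fun p _ => Or.inl (by simp))
  exact ⟨m, hm, h1, h3⟩

lemma findString_eq_foldPrefix (l : List String)
    (hc : ∀ p ∈ l, ∀ q ∈ l, p.toList <+: q.toList ∨ q.toList <+: p.toList) :
    findString l = foldPrefix l := by
  obtain ⟨m₁, e₁, g₁⟩ := findString_good l hc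
  obtain ⟨m₂, e₂, g₂⟩ := foldPrefix_good l hc
  rw [e₁, e₂, goodP_unique g₁ g₂]

lemma toList_pyRev (s : String) : (pyRev s).toList = s.toList.reverse := by
  rw [pyRev, PySem.Str.slice?_none_none_neg_one]
  simp

lemma pyRev_pyRev (s : String) : pyRev (pyRev s) = s := by
  refine String.toList_inj.mp ?_
  rw [toList_pyRev, toList_pyRev, List.reverse_reverse]

lemma pyRev_empty : pyRev "" = "" := by
  refine String.toList_inj.mp ?_
  rw [toList_pyRev]
  simp

lemma startswith_pyRev (a b : String) :
    PySem.Str.startswith (pyRev a) (pyRev b) = PySem.Str.endswith a b := by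
  rw [PySem.Str.startswith_eq, PySem.Str.endswith_eq, Bool.eq_iff_iff,
    PySem.Chars.startswith_iff, PySem.Chars.endswith_iff, toList_pyRev, toList_pyRev,
    List.reverse_prefix]

lemma foldl_bind_none {α β : Type} (k : β → α → Option β) (l : List α) :
    l.foldl (fun acc p => acc.bind (fun r => k r p)) none = none := by
  induction l with
  | nil => rfl
  | cons p t ih => simpa using ih

set_option maxHeartbeats 1000000 in
lemma foldSuffix_eq (l : List String) :
    foldSuffix l = (foldPrefix (l.map pyRev)).map pyRev := by
  unfold foldSuffix foldPrefix
  suffices h : ∀ r : String,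
      l.foldl (fun acc p => acc.bind (fun result =>
        if PySem.Str.endswith p result then some p
        else if PySem.Str.endswith result p then some result
        else none)) (some r)
      = ((l.map pyRev).foldl (fun acc p => acc.bind (fun result =>
          if PySem.Str.startswith p result then some p
          else if PySem.Str.startswith result p then some result
          else none)) (some (pyRev r))).map pyRev by
    have h0 := h ""
    rwa [pyRev_empty] at h0
  intro r
  induction l generalizing r with
  | nil => simp [pyRev_pyRev]
  | cons p t ih =>
    simp only [List.map_cons, List.foldl_cons]
    have e1 : (some r).bind (fun result =>
        if PySem.Str.endswith p result then some p
        else if PySem.Str.endswith result p then some result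
        else none)
      = if PySem.Str.endswith p r then some p
        else if PySem.Str.endswith r p then some r
        else none := rfl
    have e2 : (some (pyRev r)).bind (fun result =>
        if PySem.Str.startswith (pyRev p) result then some (pyRev p)
        else if PySem.Str.startswith result (pyRev p) then some result
        else none)
      = if PySem.Str.endswith p r then some (pyRev p)
        else if PySem.Str.endswith r p then some (pyRev r)
        else none := by
      show (if PySem.Str.startswith (pyRev p) (pyRev r) then some (pyRev p)
        else if PySem.Str.startswith (pyRev r) (pyRev p) then some (pyRev r)
        else none) = _
      rw [startswith_pyRev, startswith_pyRev]
    rw [e1, e2]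
    by_cases h1 : PySem.Str.endswith p r = true
    · rw [if_pos h1, if_pos h1]
      exact ih p
    · rw [if_neg h1, if_neg h1]
      by_cases h2 : PySem.Str.endswith r p = true
      · rw [if_pos h2, if_pos h2]
        exact ih r
      · rw [if_neg h2, if_neg h2]
        rw [foldl_bind_none (k := fun result p =>
            if PySem.Str.endswith p result then some p
            else if PySem.Str.endswith result p then some result
            else none)]
        rw [foldl_bind_none (k := fun result p =>
            if PySem.Str.startswith p result then some p
            else if PySem.Str.startswith result p then some result
            else none)]
        rfl

lemma foldl_three (patterns : List String) :
    patterns.foldl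
      (fun (acc : List String × List String × List String) pattern =>
        (acc.1 ++ [(splitPattern pattern).1], acc.2.1 ++ [(splitPattern pattern).2.1],
         acc.2.2 ++ [(splitPattern pattern).2.2]))
      ([], [], [])
    = (patterns.map (fun p => (splitPattern p).1), patterns.map (fun p => (splitPattern p).2.1),
       patterns.map (fun p => (splitPattern p).2.2)) := by
  rw [PySem.List.foldl_prod_mk (f := fun acc pattern => acc ++ [(splitPattern pattern).1])
      (g := fun acc pattern =>
        (acc.1 ++ [(splitPattern pattern).2.1], acc.2 ++ [(splitPattern pattern).2.2]))]
  rw [PySem.List.foldl_prod_mk (f := fun acc pattern => acc ++ [(splitPattern pattern).2.1])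
      (g := fun acc pattern => acc ++ [(splitPattern pattern).2.2])]
  simp only [PySem.List.foldl_append_singleton_eq_map, List.nil_append]

lemma chars_join_nil (parts : List (List Char)) :
    PySem.Chars.join [] parts = parts.flatten := by
  induction parts with
  | nil => simp [PySem.Chars.join_nil]
  | cons p rest ih =>
    cases rest with
    | nil => simp [PySem.Chars.join_singleton]
    | cons q t => simp [PySem.Chars.join_cons_cons, ih]

lemma mid_eq (patterns : List String) :
    PySem.Str.join "" (patterns.map (fun p => (splitPattern p).2.1))
    = PySem.Str.join "" ((patterns.map (fun p => (PySem.Str.split? p "*").getD [])).flatMap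
        (fun s => PySem.List.slice s (some 1) (some (-1)))) := by
  have hnil : ("" : String).toList = [] := rfl
  refine String.toList_inj.mp ?_
  rw [PySem.Str.toList_join, PySem.Str.toList_join, hnil, chars_join_nil, chars_join_nil]
  rw [List.flatMap_def, List.map_flatten, List.flatten_flatten]
  refine congrArg List.flatten ?_
  simp only [List.map_map]
  refine List.map_congr_left ?_
  intro p _
  simp only [Function.comp_apply, splitPattern]
  rw [PySem.Str.toList_join, hnil, chars_join_nil]


-- ===== VERDICT (by name: the statement is the Claim_ definition above) =====
theorem solve_spec : Claim_equal_solve := by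
  intro n patterns _ hpre
  obtain ⟨hf, hl⟩ := hpre
  have eF : findString (patterns.map (fun p =>
        (PySem.List.pyGet? ((PySem.Str.split? p "*").getD []) 0).getD ""))
      = foldPrefix (patterns.map (fun p =>
        (PySem.List.pyGet? ((PySem.Str.split? p "*").getD []) 0).getD "")) := by
    apply findString_eq_foldPrefix
    intro a ha b hb
    obtain ⟨p, hp, rfl⟩ := List.mem_map.mp ha
    obtain ⟨q, hq, rfl⟩ := List.mem_map.mp hb
    exact hf p hp q hq
  have eL : findString (patterns.map (fun p =>
        pyRev ((PySem.List.pyGet? ((PySem.Str.split? p "*").getD []) (-1)).getD "")))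
      = foldPrefix (patterns.map (fun p =>
        pyRev ((PySem.List.pyGet? ((PySem.Str.split? p "*").getD []) (-1)).getD ""))) := by
    apply findString_eq_foldPrefix
    intro a ha b hb
    obtain ⟨p, hp, rfl⟩ := List.mem_map.mp ha
    obtain ⟨q, hq, rfl⟩ := List.mem_map.mp hb
    simp only [toList_pyRev, List.reverse_prefix]
    exact (hl q hq p hp).symm
  unfold Spec_solve
  unfold solve solve_alt
  simp only [foldl_three]
  rw [foldSuffix_eq, mid_eq]
  simp only [splitPattern, List.map_map, Function.comp_def]
  rw [eF, eL]
  cases foldPrefix (patterns.map (fun p =>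
      (PySem.List.pyGet? ((PySem.Str.split? p "*").getD []) 0).getD "")) <;>
    cases foldPrefix (patterns.map (fun p =>
      pyRev ((PySem.List.pyGet? ((PySem.Str.split? p "*").getD []) (-1)).getD ""))) <;>
    rfl
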